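-- pv_equiv track=rewrite | github.com/CDCgov/NEDSS-DataReporting | performance-testing/convert.py | extract_hl7_metadata
-- ===== SOURCE A (Python) =====
-- def parse_hl7_message(hl7_text):
--     """Parse an HL7 message into segments and fields"""
--
--     hl7_text = hl7_text.replace('\n', '\r').replace('\r\r', '\r')
--     segments = [s for s in hl7_text.split('\r') if s.strip()]
--
--     parsed_segments = []
--     for segment in segments:
--         fields = segment.split('|')
--         segment_name = fields[0]
--
--         # MSH segment is special - MSH-1 is the field separator itself
--         if segment_name == 'MSH':
--             fields = ['MSH', '|'] + segment.split('|')[1:]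
--
--         parsed_segments.append({
--             'name': segment_name,
--             'fields': fields
--         })
--
--     return parsed_segments
--
-- def parse_components(field_value, component_sep='^', subcomponent_sep='&'):
--     """Parse a field into components and subcomponents"""
--     if not field_value:
--         return []
--
--     components = field_value.split(component_sep)
--     parsed = []
--     for comp in components:
--         if subcomponent_sep in comp:
--             parsed.append(comp.split(subcomponent_sep))
--         else:
--             parsed.append(comp)
--     return parsed
--
-- def extract_hl7_metadata(hl7_message):
--     """
--     Extract metadata from HL7 message for SQL INSERT.
--
--     Returns dict with:
--         - filler_order_nbr: from OBR-3 (FillerOrderNumber.EntityIdentifier)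
--         - lab_clia: from MSH-4 (SendingFacility.UniversalID)
--         - order_test_code: from OBR-4 (UniversalServiceIdentifier.Identifier)
--         - specimen_coll_date: from SPM-17 (SpecimenCollectionDateTime)
--     """
--     segments = parse_hl7_message(hl7_message)
--
--     metadata = {
--         'filler_order_nbr': '',
--         'lab_clia': '',
--         'order_test_code': '',
--         'specimen_coll_date': ''
--     }
--
--     for segment in segments:
--         seg_name = segment['name']
--         fields = segment['fields']
--
--         if seg_name == 'MSH':
--             # MSH-4: Sending Facility - get UniversalID (component 2)
--             if len(fields) > 4 and fields[4]:
--                 comps = parse_components(fields[4])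
--                 if len(comps) > 1:
--                     metadata['lab_clia'] = comps[1] if not isinstance(comps[1], list) else comps[1][0]
--
--         elif seg_name == 'OBR':
--             # OBR-3: Filler Order Number - get EntityIdentifier (component 1)
--             if len(fields) > 3 and fields[3]:
--                 comps = parse_components(fields[3])
--                 if len(comps) > 0:
--                     metadata['filler_order_nbr'] = comps[0] if not isinstance(comps[0], list) else comps[0][0]
--
--             # OBR-4: Universal Service Identifier - get Identifier (component 1)
--             if len(fields) > 4 and fields[4]:
--                 comps = parse_components(fields[4])
--                 if len(comps) > 0:
--                     metadata['order_test_code'] = comps[0] if not isinstance(comps[0], list) else comps[0][0]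
--
--         elif seg_name == 'SPM':
--             # SPM-17: Specimen Collection Date/Time
--             if len(fields) > 17 and fields[17]:
--                 metadata['specimen_coll_date'] = fields[17]
--
--     return metadata
-- ===== SOURCE B (Python) =====
-- def extract_hl7_metadata(hl7_message):
--     """Extract metadata from HL7 message: build the segment list once, then
--     answer each of the four fields by an independent backward scan (last
--     successful setter wins, matching the forward-overwrite semantics)."""
--     text = hl7_message.replace('\n', '\r').replace('\r\r', '\r')
--     segs = []
--     for s in text.split('\r'):
--         if s.strip():
--             f = s.split('|')
--             segs.append(['MSH', '|'] + f[1:] if f[0] == 'MSH' else f)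
--     segs.reverse()
--
--     def component(name, i, c):
--         # last segment named `name` whose field i is non-empty and has > c components
--         for fields in segs:
--             if fields[0] == name and len(fields) > i and fields[i]:
--                 parts = fields[i].split('^')
--                 if len(parts) > c:
--                     return parts[c].split('&')[0]
--         return ''
--
--     def raw_field(name, i):
--         for fields in segs:
--             if fields[0] == name and len(fields) > i and fields[i]:
--                 return fields[i]
--         return ''
--
--     return {
--         'filler_order_nbr': component('OBR', 3, 0),
--         'lab_clia': component('MSH', 4, 1),
--         'order_test_code': component('OBR', 4, 0),
--         'specimen_coll_date': raw_field('SPM', 17),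
--     }
-- ===== Notes on version B (the rewrite author's own statement) =====
-- stated objective: alternative
-- what changed: A makes one forward pass over the segments, mutating a metadata dict through an elif chain; B builds the parsed segment list once, reverses it, and answers each of the four fields by an independent backward scan that returns the first (i.e. forward-last) segment that actually sets it.
import Mathlib
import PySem

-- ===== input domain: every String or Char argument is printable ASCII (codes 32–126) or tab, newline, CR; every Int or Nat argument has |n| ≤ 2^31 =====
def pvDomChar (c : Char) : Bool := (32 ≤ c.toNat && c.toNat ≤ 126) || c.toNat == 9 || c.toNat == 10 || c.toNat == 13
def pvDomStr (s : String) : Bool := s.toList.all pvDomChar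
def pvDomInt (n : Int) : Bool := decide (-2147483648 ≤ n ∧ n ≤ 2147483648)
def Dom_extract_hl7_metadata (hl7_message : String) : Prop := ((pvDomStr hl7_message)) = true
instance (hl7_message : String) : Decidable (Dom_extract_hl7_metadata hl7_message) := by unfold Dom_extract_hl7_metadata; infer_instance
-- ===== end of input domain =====

-- B replaces A's single forward pass (mutating dict, elif chain over every segment) by four
-- independent backward scans over the segment list (first hit scanning backwards = last
-- forward setter); objective: alternative decomposition, same cost.

-- ===== PORT A =====
-- s.split(sep) for a NONEMPTY literal sep: Str.split? is always `some` there, so `.getD []` never fires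
def pySplit (s sep : String) : List String := (PySem.Str.split? s sep).getD []

def parse_hl7_message (hl7_text : String) : List (String × List String) :=
  let t := PySem.Str.replace (PySem.Str.replace hl7_text "\n" "\r") "\r\r" "\r"
  let segments := (pySplit t "\r").filter (fun s => PySem.Str.strip s ≠ "")
  segments.foldl (fun parsed_segments segment =>
    let fields := pySplit segment "|"
    -- fields[0]: split(sep) always returns at least one piece, so the default is never used
    let segment_name := PySem.List.pyGetD fields 0 ""
    let fields := if segment_name = "MSH" then ["MSH", "|"] ++ PySem.List.slice (pySplit segment "|") (some 1) none else fields
    parsed_segments ++ [(segment_name, fields)]) []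

def parse_components (field_value : String) : List (String ⊕ List String) :=
  if field_value = "" then []
  else (pySplit field_value "^").foldl (fun parsed comp =>
    if PySem.Str.isIn "&" comp then parsed ++ [Sum.inr (pySplit comp "&")]
    else parsed ++ [Sum.inl comp]) []

-- `comps[i] if not isinstance(comps[i], list) else comps[i][0]`; split('&') is nonempty, so the default is never used
def compVal : String ⊕ List String → String
  | Sum.inl s => s
  | Sum.inr l => PySem.List.pyGetD l 0 ""

def extract_hl7_metadata (hl7_message : String) : List (String × String) :=
  let segments := parse_hl7_message hl7_message
  let metadata : PySem.Dict String String :=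
    PySem.Dict.ofList [("filler_order_nbr", ""), ("lab_clia", ""), ("order_test_code", ""), ("specimen_coll_date", "")]
  let metadata := segments.foldl (fun metadata seg =>
    let seg_name := seg.1
    let fields := seg.2
    if seg_name = "MSH" then
      if 4 < fields.length ∧ PySem.List.pyGetD fields 4 "" ≠ "" then
        let comps := parse_components (PySem.List.pyGetD fields 4 "")
        if 1 < comps.length then
          metadata.insert "lab_clia" (compVal (PySem.List.pyGetD comps 1 (Sum.inl "")))
        else metadata
      else metadata
    else if seg_name = "OBR" then
      let metadata :=
        if 3 < fields.length ∧ PySem.List.pyGetD fields 3 "" ≠ "" then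
          let comps := parse_components (PySem.List.pyGetD fields 3 "")
          if 0 < comps.length then
            metadata.insert "filler_order_nbr" (compVal (PySem.List.pyGetD comps 0 (Sum.inl "")))
          else metadata
        else metadata
      if 4 < fields.length ∧ PySem.List.pyGetD fields 4 "" ≠ "" then
        let comps := parse_components (PySem.List.pyGetD fields 4 "")
        if 0 < comps.length then
          metadata.insert "order_test_code" (compVal (PySem.List.pyGetD comps 0 (Sum.inl "")))
        else metadata
      else metadata
    else if seg_name = "SPM" then
      if 17 < fields.length ∧ PySem.List.pyGetD fields 17 "" ≠ "" then
        metadata.insert "specimen_coll_date" (PySem.List.pyGetD fields 17 "")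
      else metadata
    else metadata) metadata
  metadata.items

-- ===== PORT B =====
def altSegments (hl7_message : String) : List (List String) :=
  let text := PySem.Str.replace (PySem.Str.replace hl7_message "\n" "\r") "\r\r" "\r"
  let segs := (pySplit text "\r").foldl (fun segs s =>
    if PySem.Str.strip s ≠ "" then
      -- f[0]: split never returns an empty list, so the default is never used
      segs ++ [if PySem.List.pyGetD (pySplit s "|") 0 "" = "MSH" then ["MSH", "|"] ++ PySem.List.slice (pySplit s "|") (some 1) none else pySplit s "|"]
    else segs) []
  segs.reverse

def altComponent (segs : List (List String)) (name : String) (i c : Nat) : String :=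
  match segs with
  | [] => ""
  | fields :: rest =>
    if PySem.List.pyGetD fields 0 "" = name ∧ i < fields.length ∧ PySem.List.pyGetD fields (i : Int) "" ≠ "" then
      let parts := pySplit (PySem.List.pyGetD fields (i : Int) "") "^"
      if c < parts.length then
        -- parts[c].split('&')[0]: split('&') is nonempty, so the default is never used
        PySem.List.pyGetD (pySplit (PySem.List.pyGetD parts (c : Int) "") "&") 0 ""
      else altComponent rest name i c
    else altComponent rest name i c

def altRawField (segs : List (List String)) (name : String) (i : Nat) : String :=
  match segs with
  | [] => ""
  | fields :: rest =>
    if PySem.List.pyGetD fields 0 "" = name ∧ i < fields.length ∧ PySem.List.pyGetD fields (i : Int) "" ≠ "" then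
      PySem.List.pyGetD fields (i : Int) ""
    else altRawField rest name i

def extract_hl7_metadata_alt (hl7_message : String) : List (String × String) :=
  let segs := altSegments hl7_message
  [("filler_order_nbr", altComponent segs "OBR" 3 0),
   ("lab_clia", altComponent segs "MSH" 4 1),
   ("order_test_code", altComponent segs "OBR" 4 0),
   ("specimen_coll_date", altRawField segs "SPM" 17)]

-- ===== PRECONDITION & SPEC =====
def Spec_extract_hl7_metadata (hl7_message : String) (out : List (String × String)) : Prop := out = extract_hl7_metadata_alt hl7_message
instance (hl7_message : String) (out : List (String × String)) : Decidable (Spec_extract_hl7_metadata hl7_message out) := by unfold Spec_extract_hl7_metadata; infer_instance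

-- ===== CLAIM (what is proved, stated in full; the proofs are below) =====
def Claim_equal_extract_hl7_metadata : Prop := ∀ (hl7_message : String), Dom_extract_hl7_metadata hl7_message → Spec_extract_hl7_metadata hl7_message (extract_hl7_metadata hl7_message)

-- ===== LEMMAS AND PROOFS =====

-- the 4-entry dict A maintains, as a function of its values
def mk4 (a b c d : String) : PySem.Dict String String :=
  PySem.Dict.ofList [("filler_order_nbr", a), ("lab_clia", b), ("order_test_code", c), ("specimen_coll_date", d)]

-- A's loop body, named (definitionally equal to the inline lambda of the port)
def stepA (metadata : PySem.Dict String String) (seg : String × List String) : PySem.Dict String String :=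
  let seg_name := seg.1
  let fields := seg.2
  if seg_name = "MSH" then
    if 4 < fields.length ∧ PySem.List.pyGetD fields 4 "" ≠ "" then
      let comps := parse_components (PySem.List.pyGetD fields 4 "")
      if 1 < comps.length then
        metadata.insert "lab_clia" (compVal (PySem.List.pyGetD comps 1 (Sum.inl "")))
      else metadata
    else metadata
  else if seg_name = "OBR" then
    let metadata :=
      if 3 < fields.length ∧ PySem.List.pyGetD fields 3 "" ≠ "" then
        let comps := parse_components (PySem.List.pyGetD fields 3 "")
        if 0 < comps.length then
          metadata.insert "filler_order_nbr" (compVal (PySem.List.pyGetD comps 0 (Sum.inl "")))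
        else metadata
      else metadata
    if 4 < fields.length ∧ PySem.List.pyGetD fields 4 "" ≠ "" then
      let comps := parse_components (PySem.List.pyGetD fields 4 "")
      if 0 < comps.length then
        metadata.insert "order_test_code" (compVal (PySem.List.pyGetD comps 0 (Sum.inl "")))
      else metadata
    else metadata
  else if seg_name = "SPM" then
    if 17 < fields.length ∧ PySem.List.pyGetD fields 17 "" ≠ "" then
      metadata.insert "specimen_coll_date" (PySem.List.pyGetD fields 17 "")
    else metadata
  else metadata

-- "segment with fields f sets the value keyed (name, i, c)" as an Option-valued setter
def gset (name : String) (i c : Nat) (f : List String) : Option String :=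
  if PySem.List.pyGetD f 0 "" = name ∧ i < f.length ∧ PySem.List.pyGetD f (i : Int) "" ≠ "" ∧
     c < (pySplit (PySem.List.pyGetD f (i : Int) "") "^").length then
    some (PySem.List.pyGetD (pySplit (PySem.List.pyGetD (pySplit (PySem.List.pyGetD f (i : Int) "") "^") (c : Int) "") "&") 0 "")
  else none

def graw (name : String) (i : Nat) (f : List String) : Option String :=
  if PySem.List.pyGetD f 0 "" = name ∧ i < f.length ∧ PySem.List.pyGetD f (i : Int) "" ≠ "" then
    some (PySem.List.pyGetD f (i : Int) "")
  else none

-- one parsed component the way parse_components encodes it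
def encC (comp : String) : String ⊕ List String :=
  if PySem.Str.isIn "&" comp then Sum.inr (pySplit comp "&") else Sum.inl comp

-- last-setter-wins value of the forward fold, read off backwards
def lastSet (g : List String → Option String) (L : List (String × List String)) (v : String) : String :=
  (((L.map Prod.snd).reverse).findSome? g).getD v

def fixF (segment : String) : List String :=
  let fields := pySplit segment "|"
  if PySem.List.pyGetD fields 0 "" = "MSH" then ["MSH", "|"] ++ PySem.List.slice (pySplit segment "|") (some 1) none
  else fields

def filteredSegs (hl7_message : String) : List String :=
  (pySplit (PySem.Str.replace (PySem.Str.replace hl7_message "\n" "\r") "\r\r" "\r") "\r").filter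
    (fun s => PySem.Str.strip s ≠ "")

lemma splitOn_go_of_not_infix (sep : List Char) :
    ∀ (fuel : Nat) (s cur : List Char) (acc : List (List Char)), s.length < fuel → ¬ sep <:+: s →
      PySem.Chars.splitOn.go sep fuel s cur acc = ((cur.reverse ++ s) :: acc).reverse := by
  intro fuel
  induction fuel with
  | zero => intro s cur acc h; omega
  | succ fuel ih =>
    intro s cur acc hl hinf
    cases s with
    | nil => simp [PySem.Chars.splitOn.go]
    | cons ch rest =>
      have hpre : sep.isPrefixOf (ch :: rest) = false := by
        rw [Bool.eq_false_iff]
        intro hp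
        exact hinf ((List.isPrefixOf_iff_prefix.mp hp).isInfix)
      rw [PySem.Chars.splitOn.go]
      simp only [hpre, Bool.false_eq_true, if_false]
      rw [ih rest (ch :: cur) acc (by simpa using Nat.lt_of_succ_lt_succ hl)
        (fun h => hinf (List.infix_cons h))]
      simp

lemma pySplit_not_in (x : String) (h : PySem.Str.isIn "&" x = false) : pySplit x "&" = [x] := by
  have hinf : ¬ ['&'] <:+: x.toList := by
    rw [PySem.Str.isIn_eq] at h
    exact (PySem.Chars.isIn_eq_false_iff _ _).mp (by simpa using h)
  have hgo := splitOn_go_of_not_infix ['&'] (x.toList.length + 1) x.toList [] [] (by omega) hinf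
  unfold pySplit
  rw [PySem.Str.split?]
  simp only [PySem.Chars.split?]
  norm_num
  rw [PySem.Chars.splitOn, show ("&" : String).toList = ['&'] from rfl, hgo]
  simp [String.ofList_toList]

lemma parse_components_eq (field : String) (h : field ≠ "") :
    parse_components field = (pySplit field "^").map encC := by
  unfold parse_components
  rw [if_neg h]
  have hfun : (fun (parsed : List (String ⊕ List String)) comp =>
      if PySem.Str.isIn "&" comp then parsed ++ [Sum.inr (pySplit comp "&")]
      else parsed ++ [Sum.inl comp]) = fun parsed comp => parsed ++ [encC comp] := by
    funext p c; unfold encC; split <;> rfl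
  rw [hfun, PySem.List.foldl_append_singleton_eq_map]
  simp

lemma compVal_enc (x : String) :
    compVal (encC x) = PySem.List.pyGetD (pySplit x "&") 0 "" := by
  unfold encC
  cases h : PySem.Str.isIn "&" x
  · rw [if_neg (by simp [h]), pySplit_not_in x h]
    simp [compVal, PySem.List.pyGetD_zero_cons]
  · rw [if_pos (by simp [h])]
    rfl

lemma compVal_index (parts : List String) (c : Nat) (hc : c < parts.length) :
    compVal (PySem.List.pyGetD (parts.map encC) (c : Int) (Sum.inl ""))
      = PySem.List.pyGetD (pySplit (PySem.List.pyGetD parts (c : Int) "") "&") 0 "" := by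
  rw [PySem.List.pyGetD_natCast, PySem.List.pyGetD_natCast]
  rw [List.getD_eq_getElem _ _ (by simpa using hc), List.getD_eq_getElem _ _ hc, List.getElem_map]
  exact compVal_enc _

lemma gset_pos (name : String) (i c : Nat) (f : List String)
    (h1 : PySem.List.pyGetD f 0 "" = name) (h2 : i < f.length)
    (h3 : PySem.List.pyGetD f (i : Int) "" ≠ "")
    (h4 : c < (pySplit (PySem.List.pyGetD f (i : Int) "") "^").length) :
    gset name i c f = some (PySem.List.pyGetD (pySplit (PySem.List.pyGetD (pySplit (PySem.List.pyGetD f (i : Int) "") "^") (c : Int) "") "&") 0 "") := by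
  unfold gset; rw [if_pos ⟨h1, h2, h3, h4⟩]

lemma gset_neg (name : String) (i c : Nat) (f : List String)
    (h : ¬ (PySem.List.pyGetD f 0 "" = name ∧ i < f.length ∧ PySem.List.pyGetD f (i : Int) "" ≠ "" ∧
      c < (pySplit (PySem.List.pyGetD f (i : Int) "") "^").length)) : gset name i c f = none := by
  unfold gset; rw [if_neg h]

lemma ins1 (a b c d x : String) : (mk4 a b c d).insert "filler_order_nbr" x = mk4 x b c d := rfl
lemma ins2 (a b c d x : String) : (mk4 a b c d).insert "lab_clia" x = mk4 a x c d := rfl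
lemma ins3 (a b c d x : String) : (mk4 a b c d).insert "order_test_code" x = mk4 a b x d := rfl
lemma ins4 (a b c d x : String) : (mk4 a b c d).insert "specimen_coll_date" x = mk4 a b c x := rfl

set_option maxHeartbeats 1000000 in
lemma msh_block (f : List String) (hM : PySem.List.pyGetD f 0 "" = "MSH") (a b c d : String) :
    (if 4 < f.length ∧ PySem.List.pyGetD f 4 "" ≠ "" then
       (if 1 < (parse_components (PySem.List.pyGetD f 4 "")).length then
          (mk4 a b c d).insert "lab_clia" (compVal (PySem.List.pyGetD (parse_components (PySem.List.pyGetD f 4 "")) 1 (Sum.inl "")))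
        else mk4 a b c d)
     else mk4 a b c d)
    = mk4 a ((gset "MSH" 4 1 f).getD b) c d := by
  by_cases h4 : 4 < f.length ∧ PySem.List.pyGetD f 4 "" ≠ ""
  · rw [if_pos h4, parse_components_eq _ h4.2]
    by_cases hlen : 1 < (pySplit (PySem.List.pyGetD f (4:Int) "") "^").length
    · rw [if_pos (show 1 < (List.map encC (pySplit (PySem.List.pyGetD f (4:Int) "") "^")).length by simpa using hlen)]
      have hg := gset_pos "MSH" 4 1 f hM (by omega) (by simpa using h4.2) (by simpa using hlen)
      have hv := compVal_index (pySplit (PySem.List.pyGetD f ((4:Nat):Int) "") "^") 1 (by simpa using hlen)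
      simp only [Nat.cast_ofNat, Nat.cast_one] at hg hv
      rw [hg, hv, Option.getD_some, ins2]
    · rw [if_neg (show ¬ 1 < (List.map encC (pySplit (PySem.List.pyGetD f (4:Int) "") "^")).length by simpa using hlen)]
      rw [gset_neg "MSH" 4 1 f (by simp only [Nat.cast_ofNat, Nat.cast_one]; tauto), Option.getD_none]
  · rw [if_neg h4, gset_neg "MSH" 4 1 f (by simp only [Nat.cast_ofNat, Nat.cast_one]; tauto), Option.getD_none]

set_option maxHeartbeats 1000000 in
lemma obr3_block (f : List String) (hO : PySem.List.pyGetD f 0 "" = "OBR") (a b c d : String) :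
    (if 3 < f.length ∧ PySem.List.pyGetD f 3 "" ≠ "" then
       (if 0 < (parse_components (PySem.List.pyGetD f 3 "")).length then
          (mk4 a b c d).insert "filler_order_nbr" (compVal (PySem.List.pyGetD (parse_components (PySem.List.pyGetD f 3 "")) 0 (Sum.inl "")))
        else mk4 a b c d)
     else mk4 a b c d)
    = mk4 ((gset "OBR" 3 0 f).getD a) b c d := by
  by_cases h3 : 3 < f.length ∧ PySem.List.pyGetD f 3 "" ≠ ""
  · rw [if_pos h3, parse_components_eq _ h3.2]
    by_cases hlen : 0 < (pySplit (PySem.List.pyGetD f (3:Int) "") "^").length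
    · rw [if_pos (show 0 < (List.map encC (pySplit (PySem.List.pyGetD f (3:Int) "") "^")).length by simpa using hlen)]
      have hg := gset_pos "OBR" 3 0 f hO (by omega) (by simpa using h3.2) (by simpa using hlen)
      have hv := compVal_index (pySplit (PySem.List.pyGetD f ((3:Nat):Int) "") "^") 0 (by simpa using hlen)
      simp only [Nat.cast_ofNat, Nat.cast_zero] at hg hv
      rw [hg, hv, Option.getD_some, ins1]
    · rw [if_neg (show ¬ 0 < (List.map encC (pySplit (PySem.List.pyGetD f (3:Int) "") "^")).length by simpa using hlen)]
      rw [gset_neg "OBR" 3 0 f (by simp only [Nat.cast_ofNat, Nat.cast_zero]; tauto), Option.getD_none]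
  · rw [if_neg h3, gset_neg "OBR" 3 0 f (by simp only [Nat.cast_ofNat, Nat.cast_zero]; tauto), Option.getD_none]

set_option maxHeartbeats 1000000 in
lemma obr4_block (f : List String) (hO : PySem.List.pyGetD f 0 "" = "OBR") (a b c d : String) :
    (if 4 < f.length ∧ PySem.List.pyGetD f 4 "" ≠ "" then
       (if 0 < (parse_components (PySem.List.pyGetD f 4 "")).length then
          (mk4 a b c d).insert "order_test_code" (compVal (PySem.List.pyGetD (parse_components (PySem.List.pyGetD f 4 "")) 0 (Sum.inl "")))
        else mk4 a b c d)
     else mk4 a b c d)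
    = mk4 a b ((gset "OBR" 4 0 f).getD c) d := by
  by_cases h4 : 4 < f.length ∧ PySem.List.pyGetD f 4 "" ≠ ""
  · rw [if_pos h4, parse_components_eq _ h4.2]
    by_cases hlen : 0 < (pySplit (PySem.List.pyGetD f (4:Int) "") "^").length
    · rw [if_pos (show 0 < (List.map encC (pySplit (PySem.List.pyGetD f (4:Int) "") "^")).length by simpa using hlen)]
      have hg := gset_pos "OBR" 4 0 f hO (by omega) (by simpa using h4.2) (by simpa using hlen)
      have hv := compVal_index (pySplit (PySem.List.pyGetD f ((4:Nat):Int) "") "^") 0 (by simpa using hlen)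
      simp only [Nat.cast_ofNat, Nat.cast_zero] at hg hv
      rw [hg, hv, Option.getD_some, ins3]
    · rw [if_neg (show ¬ 0 < (List.map encC (pySplit (PySem.List.pyGetD f (4:Int) "") "^")).length by simpa using hlen)]
      rw [gset_neg "OBR" 4 0 f (by simp only [Nat.cast_ofNat, Nat.cast_zero]; tauto), Option.getD_none]
  · rw [if_neg h4, gset_neg "OBR" 4 0 f (by simp only [Nat.cast_ofNat, Nat.cast_zero]; tauto), Option.getD_none]

set_option maxHeartbeats 1000000 in
lemma spm_block (f : List String) (hS : PySem.List.pyGetD f 0 "" = "SPM") (a b c d : String) :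
    (if 17 < f.length ∧ PySem.List.pyGetD f 17 "" ≠ "" then
       (mk4 a b c d).insert "specimen_coll_date" (PySem.List.pyGetD f 17 "")
     else mk4 a b c d)
    = mk4 a b c ((graw "SPM" 17 f).getD d) := by
  by_cases h17 : 17 < f.length ∧ PySem.List.pyGetD f 17 "" ≠ ""
  · rw [if_pos h17]
    have hg : graw "SPM" 17 f = some (PySem.List.pyGetD f ((17:Nat):Int) "") := by
      unfold graw; rw [if_pos (by simp only [Nat.cast_ofNat]; tauto)]
    simp only [Nat.cast_ofNat] at hg
    rw [hg, Option.getD_some, ins4]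
  · rw [if_neg h17]
    have hg : graw "SPM" 17 f = none := by
      unfold graw; rw [if_neg (by simp only [Nat.cast_ofNat]; tauto)]
    rw [hg, Option.getD_none]

set_option maxHeartbeats 2000000 in
lemma step_eq (n : String) (f : List String) (hn : n = PySem.List.pyGetD f 0 "") (a b c d : String) :
    stepA (mk4 a b c d) (n, f)
    = mk4 ((gset "OBR" 3 0 f).getD a) ((gset "MSH" 4 1 f).getD b)
          ((gset "OBR" 4 0 f).getD c) ((graw "SPM" 17 f).getD d) := by
  subst hn
  unfold stepA
  simp only []
  by_cases hM : PySem.List.pyGetD f 0 "" = "MSH"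
  · rw [if_pos hM]
    rw [gset_neg "OBR" 3 0 f (by simp [hM]), gset_neg "OBR" 4 0 f (by simp [hM])]
    have hg : graw "SPM" 17 f = none := by unfold graw; rw [if_neg (by simp [hM])]
    rw [hg]
    simp only [Option.getD_none]
    exact msh_block f hM a b c d
  · rw [if_neg hM, gset_neg "MSH" 4 1 f (by tauto)]
    by_cases hO : PySem.List.pyGetD f 0 "" = "OBR"
    · rw [if_pos hO]
      have hg : graw "SPM" 17 f = none := by unfold graw; rw [if_neg (by simp [hO])]
      rw [hg]
      simp only [Option.getD_none]
      rw [obr3_block f hO a b c d, obr4_block f hO ((gset "OBR" 3 0 f).getD a) b c d]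
    · rw [if_neg hO]
      rw [gset_neg "OBR" 3 0 f (by tauto), gset_neg "OBR" 4 0 f (by tauto)]
      by_cases hS : PySem.List.pyGetD f 0 "" = "SPM"
      · rw [if_pos hS]
        simp only [Option.getD_none]
        exact spm_block f hS a b c d
      · rw [if_neg hS]
        have hg : graw "SPM" 17 f = none := by unfold graw; rw [if_neg (by tauto)]
        rw [hg]
        simp only [Option.getD_none]

lemma altComponent_eq (M : List (List String)) (name : String) (i c : Nat) :
    altComponent M name i c = ((M.findSome? (gset name i c)).getD "") := by
  induction M with
  | nil => rfl
  | cons fields rest ih =>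
    by_cases h1 : PySem.List.pyGetD fields 0 "" = name ∧ i < fields.length ∧ PySem.List.pyGetD fields (i : Int) "" ≠ ""
    · by_cases h2 : c < (pySplit (PySem.List.pyGetD fields (i : Int) "") "^").length
      · have hg : gset name i c fields = some (PySem.List.pyGetD (pySplit (PySem.List.pyGetD (pySplit (PySem.List.pyGetD fields (i : Int) "") "^") (c : Int) "") "&") 0 "") := by
          unfold gset; rw [if_pos ⟨h1.1, h1.2.1, h1.2.2, h2⟩]
        simp only [altComponent, List.findSome?_cons, hg, if_pos h1, if_pos h2, Option.getD_some]
      · have hg : gset name i c fields = none := by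
          unfold gset; rw [if_neg (by tauto)]
        simp only [altComponent, List.findSome?_cons, hg, if_pos h1, if_neg h2, ih]
    · have hg : gset name i c fields = none := by
        unfold gset; rw [if_neg (by tauto)]
      simp only [altComponent, List.findSome?_cons, hg, if_neg h1, ih]

lemma altRawField_eq (M : List (List String)) (name : String) (i : Nat) :
    altRawField M name i = ((M.findSome? (graw name i)).getD "") := by
  induction M with
  | nil => rfl
  | cons fields rest ih =>
    by_cases h1 : PySem.List.pyGetD fields 0 "" = name ∧ i < fields.length ∧ PySem.List.pyGetD fields (i : Int) "" ≠ ""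
    · have hg : graw name i fields = some (PySem.List.pyGetD fields (i : Int) "") := by
        unfold graw; rw [if_pos h1]
      simp only [altRawField, List.findSome?_cons, hg, if_pos h1, Option.getD_some]
    · have hg : graw name i fields = none := by unfold graw; rw [if_neg h1]
      simp only [altRawField, List.findSome?_cons, hg, if_neg h1, ih]

lemma lastSet_cons (g : List String → Option String) (p : String × List String)
    (L : List (String × List String)) (v : String) :
    lastSet g (p :: L) v = lastSet g L ((g p.2).getD v) := by
  unfold lastSet
  simp only [List.map_cons, List.reverse_cons, List.findSome?_append]
  cases h : (List.map Prod.snd L).reverse.findSome? g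
  · cases hg : g p.2 <;> simp [List.findSome?, hg]
  · simp

lemma head_fixF (s : String) : PySem.List.pyGetD (pySplit s "|") 0 "" = PySem.List.pyGetD (fixF s) 0 "" := by
  unfold fixF
  by_cases h : PySem.List.pyGetD (pySplit s "|") 0 "" = "MSH"
  · rw [if_pos h, h]
    simp [PySem.List.pyGetD_zero_cons]
  · rw [if_neg h]

lemma parse_eq (msg : String) :
    parse_hl7_message msg = (filteredSegs msg).map
      (fun s => (PySem.List.pyGetD (pySplit s "|") 0 "", fixF s)) := by
  unfold parse_hl7_message filteredSegs
  rw [PySem.List.foldl_append_singleton_eq_map]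
  simp [fixF]

lemma altSegments_eq (msg : String) :
    altSegments msg = ((filteredSegs msg).map fixF).reverse := by
  show (List.foldl (fun segs s => if PySem.Str.strip s ≠ "" then segs ++ [fixF s] else segs) []
    (pySplit (PySem.Str.replace (PySem.Str.replace msg "\n" "\r") "\r\r" "\r") "\r")).reverse
    = ((filteredSegs msg).map fixF).reverse
  rw [PySem.List.foldl_append_ite (p := fun s => PySem.Str.strip s ≠ "") (f := fixF)]
  simp [filteredSegs]

lemma items_mk4 (a b c d : String) :
    (mk4 a b c d).items = [("filler_order_nbr", a), ("lab_clia", b), ("order_test_code", c), ("specimen_coll_date", d)] := rfl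

lemma foldA (L : List (String × List String)) :
    ∀ (a b c d : String), (∀ p ∈ L, p.1 = PySem.List.pyGetD p.2 0 "") →
    L.foldl stepA (mk4 a b c d)
      = mk4 (lastSet (gset "OBR" 3 0) L a) (lastSet (gset "MSH" 4 1) L b)
            (lastSet (gset "OBR" 4 0) L c) (lastSet (graw "SPM" 17) L d) := by
  induction L with
  | nil => intro a b c d _; simp [lastSet]
  | cons p L ih =>
    intro a b c d h
    obtain ⟨n, f⟩ := p
    rw [List.foldl_cons, step_eq n f (h (n, f) (by simp)) a b c d,
      ih _ _ _ _ (fun q hq => h q (by simp [hq])),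
      lastSet_cons, lastSet_cons, lastSet_cons, lastSet_cons]

-- ===== VERDICT (by name: the statement is the Claim_ definition above) =====
set_option maxHeartbeats 1000000 in
theorem extract_hl7_metadata_spec : Claim_equal_extract_hl7_metadata := by
  intro msg _
  show extract_hl7_metadata msg = extract_hl7_metadata_alt msg
  have hA : extract_hl7_metadata msg = ((parse_hl7_message msg).foldl stepA (mk4 "" "" "" "")).items := rfl
  rw [hA, parse_eq]
  rw [foldA _ "" "" "" "" (by
    intro p hp
    simp only [List.mem_map] at hp
    obtain ⟨s, _, rfl⟩ := hp
    exact head_fixF s)]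
  rw [items_mk4]
  have hB : extract_hl7_metadata_alt msg =
      [("filler_order_nbr", altComponent (altSegments msg) "OBR" 3 0),
       ("lab_clia", altComponent (altSegments msg) "MSH" 4 1),
       ("order_test_code", altComponent (altSegments msg) "OBR" 4 0),
       ("specimen_coll_date", altRawField (altSegments msg) "SPM" 17)] := rfl
  rw [hB, altComponent_eq, altComponent_eq, altComponent_eq, altRawField_eq, altSegments_eq]
  unfold lastSet
  simp only [List.map_map]
  rw [show (Prod.snd ∘ fun s => (PySem.List.pyGetD (pySplit s "|") 0 "", fixF s)) = fixF from rfl]
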